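-- pv_equiv track=rewrite | github.com/Crunc2h/GAforJSS | genetic_job_shop_scheduler.py | convert_chromosome_segments_to_dna
-- ===== SOURCE A (Python) =====
-- def convert_chromosome_segments_to_dna(chromosome):
--     boundaries, segments = [], []
--     for chromosome_segment in chromosome:
--         segment = []
--         boundary = []
--         index_in_array = 0
--         for i in range(len(chromosome_segment)):
--             machine_job_processing_orders = chromosome_segment[i]
--             for job_process_priority in machine_job_processing_orders:
--                 segment.append(job_process_priority)
--                 index_in_array += 1
--
--             if i != len(chromosome_segment) - 1:
--                 boundary.append(index_in_array)
--
--         boundaries.append(boundary)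
--         segments.append(segment)
--
--     return boundaries, segments
-- ===== SOURCE B (Python) =====
-- def convert_chromosome_segments_to_dna(chromosome):
--     boundaries = [[sum(len(m) for m in cseg[:k]) for k in range(1, len(cseg))]
--                   for cseg in chromosome]
--     segments = [[p for m in cseg for p in m] for cseg in chromosome]
--     return boundaries, segments
-- ===== Notes on version B (the rewrite author's own statement) =====
-- stated objective: simpler
-- what changed: Replaces the threaded running index_in_array counter and the inline i != last guard by two comprehensions: segments are flattened directly and each boundary list is the prefix sums of the machine lengths (sum over cseg[:k] for k = 1..len-1).
import Mathlib
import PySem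

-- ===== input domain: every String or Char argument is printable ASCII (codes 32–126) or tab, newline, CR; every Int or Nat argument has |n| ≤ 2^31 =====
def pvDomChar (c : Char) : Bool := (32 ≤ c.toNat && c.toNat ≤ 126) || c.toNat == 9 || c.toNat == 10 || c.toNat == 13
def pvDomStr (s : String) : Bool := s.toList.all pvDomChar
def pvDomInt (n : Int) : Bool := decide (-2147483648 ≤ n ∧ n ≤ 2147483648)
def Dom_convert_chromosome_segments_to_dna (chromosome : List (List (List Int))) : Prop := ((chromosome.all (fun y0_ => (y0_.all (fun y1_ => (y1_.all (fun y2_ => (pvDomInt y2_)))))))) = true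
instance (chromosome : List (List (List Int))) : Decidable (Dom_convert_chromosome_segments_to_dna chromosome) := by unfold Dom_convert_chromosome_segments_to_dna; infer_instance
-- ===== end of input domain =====

-- B replaces A's threaded running element counter and inline last-index guard by two
-- comprehensions: direct flattening, and boundaries as prefix sums of machine lengths
-- over the slices cseg[:k] (objective: simpler; not faster).


-- ===== PORT A =====
-- Transliteration of A: outer for-loop = foldl over chromosome; inner for-loop over
-- range(len(cseg)) = foldl over pyRange, state (segment, boundary, index_in_array);
-- innermost for-loop = foldl appending each element and incrementing the counter.
def convert_chromosome_segments_to_dna (chromosome : List (List (List Int))) : List (List Int) × List (List Int) :=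
  chromosome.foldl
    (fun (acc : List (List Int) × List (List Int)) cseg =>
      let st :=
        (PySem.List.pyRange 0 (cseg.length : Int) 1).foldl
          (fun (st : List Int × List Int × Int) i =>
            let machine := PySem.List.pyGetD cseg i []
            let r := machine.foldl (fun (q : List Int × Int) j => (q.1 ++ [j], q.2 + 1)) (st.1, st.2.2)
            (r.1, if i ≠ (cseg.length : Int) - 1 then st.2.1 ++ [r.2] else st.2.1, r.2))
          ([], [], (0 : Int))
      (acc.1 ++ [st.2.1], acc.2 ++ [st.1]))
    ([], [])

-- ===== PORT B =====
-- Transliteration of B: boundaries = prefix sums of machine lengths via sum over the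
-- slice cseg[:k] for k in range(1, len(cseg)); segments = flattening comprehension.
def convert_chromosome_segments_to_dna_alt (chromosome : List (List (List Int))) : List (List Int) × List (List Int) :=
  ( chromosome.map (fun cseg =>
      (PySem.List.pyRange 1 (cseg.length : Int) 1).map (fun k =>
        ((PySem.List.slice cseg none (some k)).map (fun m => (m.length : Int))).sum)),
    chromosome.map (fun cseg => cseg.flatMap (fun m => m)) )

-- ===== PRECONDITION & SPEC =====
def Spec_convert_chromosome_segments_to_dna (chromosome : List (List (List Int))) (out : List (List Int) × List (List Int)) : Prop := out = convert_chromosome_segments_to_dna_alt chromosome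
instance (chromosome : List (List (List Int))) (out : List (List Int) × List (List Int)) : Decidable (Spec_convert_chromosome_segments_to_dna chromosome out) := by unfold Spec_convert_chromosome_segments_to_dna; infer_instance

-- ===== CLAIM (what is proved, stated in full; the proofs are below) =====
def Claim_equal_convert_chromosome_segments_to_dna : Prop := ∀ (chromosome : List (List (List Int))), Dom_convert_chromosome_segments_to_dna chromosome → Spec_convert_chromosome_segments_to_dna chromosome (convert_chromosome_segments_to_dna chromosome)

-- ===== LEMMAS AND PROOFS =====

-- boundary values produced by A on one segment: running totals of machine lengths,
-- skipping the last machine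
def bsums (idx : Int) : List (List Int) → List Int
  | [] => []
  | m :: rest => if rest = [] then [] else (idx + m.length) :: bsums (idx + m.length) rest

lemma inner_elems (m : List Int) : ∀ (seg : List Int) (idx : Int),
    m.foldl (fun (q : List Int × Int) j => (q.1 ++ [j], q.2 + 1)) (seg, idx)
      = (seg ++ m, idx + m.length) := by
  induction m with
  | nil => intro seg idx; simp
  | cons x xs ih =>
      intro seg idx
      simp only [List.foldl_cons, ih, Prod.mk.injEq]
      exact ⟨by simp, by simp [List.length_cons]; omega⟩

-- A's inner-loop body, named so the induction can rewrite one step without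
-- touching the occurrences under the fold's binder
def stepA (cs : List (List Int)) (st : List Int × List Int × Int) (i : Int) :
    List Int × List Int × Int :=
  let machine := PySem.List.pyGetD cs i []
  let r := machine.foldl (fun (q : List Int × Int) j => (q.1 ++ [j], q.2 + 1)) (st.1, st.2.2)
  (r.1, if i ≠ (cs.length : Int) - 1 then st.2.1 ++ [r.2] else st.2.1, r.2)

lemma inner_loop (cs : List (List Int)) : ∀ (tail : List (List Int)) (a : Nat),
    cs.drop a = tail → ∀ (seg bnd : List Int) (idx : Int),
    (PySem.List.pyRange (a : Int) (cs.length : Int) 1).foldl (stepA cs) (seg, bnd, idx)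
      = (seg ++ tail.flatMap (fun m => m), bnd ++ bsums idx tail,
         idx + (tail.map (fun m => (m.length : Int))).sum) := by
  intro tail
  induction tail with
  | nil =>
      intro a h seg bnd idx
      have hle : cs.length ≤ a := by
        by_contra hlt
        rw [List.drop_eq_nil_iff] at h; omega
      rw [PySem.List.pyRange_one_eq_nil (by exact_mod_cast hle)]
      simp [bsums]
  | cons m rest ih =>
      intro a h seg bnd idx
      have ha : a < cs.length := by
        by_contra hge
        rw [List.drop_eq_nil_iff.mpr (by omega)] at h
        exact List.cons_ne_nil _ _ h.symm
      have hd := List.drop_eq_getElem_cons ha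
      rw [hd] at h
      have hm : cs[a] = m := by injection h
      have hrest : cs.drop (a + 1) = rest := by injection h
      have hget : PySem.List.pyGetD cs (a : Int) [] = m := by
        rw [PySem.List.pyGetD_natCast, List.getD_eq_getElem _ _ ha, hm]
      rw [PySem.List.pyRange_one_cons (by exact_mod_cast ha), List.foldl_cons]
      have hstep : stepA cs (seg, bnd, idx) (a : Int)
          = (seg ++ m, if (a : Int) ≠ (cs.length : Int) - 1 then bnd ++ [idx + m.length] else bnd,
             idx + m.length) := by
        simp [stepA, hget, inner_elems]
      rw [hstep, show ((a : Int) + 1) = ((a + 1 : Nat) : Int) by push_cast; ring,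
        ih (a + 1) hrest]
      by_cases hr : rest = []
      · have hlen : cs.length = a + 1 := by
          have := List.drop_eq_nil_iff.mp (hrest.trans hr)
          omega
        have hcond : ¬ ((a : Int) ≠ (cs.length : Int) - 1) := by
          simp only [ne_eq, not_not]; omega
        subst hr
        simp [if_neg hcond, bsums]
      · have hlt : a + 1 < cs.length := by
          by_contra hge
          rw [List.drop_eq_nil_iff.mpr (by omega)] at hrest
          exact hr hrest.symm
        have hcond : ((a : Int) ≠ (cs.length : Int) - 1) := by omega
        simp [if_pos hcond, bsums, hr, List.append_assoc, add_assoc]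

lemma bsums_eq_range : ∀ (cs : List (List Int)) (idx : Int),
    (List.range (cs.length - 1)).map
        (fun j => idx + ((cs.take (j + 1)).map (fun m => (m.length : Int))).sum)
      = bsums idx cs
  | [], idx => by simp [bsums]
  | [m], idx => by simp [bsums]
  | m :: r :: rs, idx => by
      have ih := bsums_eq_range (r :: rs) (idx + m.length)
      simp only [List.length_cons] at ih ⊢
      rw [show rs.length + 1 + 1 - 1 = rs.length + 1 from rfl, List.range_succ_eq_map]
      simp only [List.map_cons, List.map_map]
      rw [show bsums idx (m :: r :: rs)
            = (idx + m.length) :: bsums (idx + m.length) (r :: rs) by simp [bsums]]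
      congr 1
      refine Eq.trans (List.map_congr_left ?_) (by simpa using ih)
      intro j hj
      simp only [Function.comp_apply, Nat.succ_eq_add_one, List.take_succ_cons,
        List.map_cons, List.sum_cons, ← List.map_take]
      ring

lemma alt_boundary (cs : List (List Int)) :
    (PySem.List.pyRange 1 (cs.length : Int) 1).map (fun k =>
        ((PySem.List.slice cs none (some k)).map (fun m => (m.length : Int))).sum)
      = bsums 0 cs := by
  have h := bsums_eq_range cs 0
  rw [PySem.List.pyRange_one, show (((cs.length : Int)) - 1).toNat = cs.length - 1 by omega,
    List.map_map, ← h]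
  apply List.map_congr_left
  intro j hj
  simp only [Function.comp_apply]
  rw [show (1 + (j : Int)) = ((j + 1 : Nat) : Int) by push_cast; ring,
    PySem.List.slice_to_natCast]
  simp

lemma outer_fold (fb fs : List (List Int) → List Int) (ch : List (List (List Int))) :
    ∀ (bacc sacc : List (List Int)),
    ch.foldl (fun (acc : List (List Int) × List (List Int)) cseg =>
        (acc.1 ++ [fb cseg], acc.2 ++ [fs cseg])) (bacc, sacc)
      = (bacc ++ ch.map fb, sacc ++ ch.map fs) := by
  induction ch with
  | nil => intro bacc sacc; simp
  | cons c cs ih => intro bacc sacc; simp [ih]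


-- ===== VERDICT (by name: the statement is the Claim_ definition above) =====
theorem convert_chromosome_segments_to_dna_spec : Claim_equal_convert_chromosome_segments_to_dna := by
  intro chromosome _
  show convert_chromosome_segments_to_dna chromosome = convert_chromosome_segments_to_dna_alt chromosome
  unfold convert_chromosome_segments_to_dna convert_chromosome_segments_to_dna_alt
  have hbody : (fun (acc : List (List Int) × List (List Int)) cseg =>
      let st :=
        (PySem.List.pyRange 0 (List.length cseg : Int) 1).foldl
          (fun (st : List Int × List Int × Int) i =>
            let machine := PySem.List.pyGetD cseg i []
            let r := machine.foldl (fun (q : List Int × Int) j => (q.1 ++ [j], q.2 + 1)) (st.1, st.2.2)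
            (r.1, if i ≠ (List.length cseg : Int) - 1 then st.2.1 ++ [r.2] else st.2.1, r.2))
          ([], [], (0 : Int))
      (acc.1 ++ [st.2.1], acc.2 ++ [st.1]))
      = (fun (acc : List (List Int) × List (List Int)) cseg =>
          (acc.1 ++ [bsums 0 cseg], acc.2 ++ [cseg.flatMap (fun m => m)])) := by
    funext acc cseg
    have h := inner_loop cseg cseg 0 (by simp) [] [] 0
    rw [show stepA cseg = (fun (st : List Int × List Int × Int) i =>
        let machine := PySem.List.pyGetD cseg i []
        let r := machine.foldl (fun (q : List Int × Int) j => (q.1 ++ [j], q.2 + 1)) (st.1, st.2.2)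
        (r.1, if i ≠ (cseg.length : Int) - 1 then st.2.1 ++ [r.2] else st.2.1, r.2)) from rfl] at h
    simp only [Int.natCast_zero, List.nil_append] at h
    simp only [h]
  rw [hbody, outer_fold]
  simp only [List.nil_append, Prod.mk.injEq]
  exact ⟨List.map_congr_left (fun cseg _ => (alt_boundary cseg).symm), trivial⟩
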